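-- pv_equiv track=rewrite | github.com/toombs-caeman/forth | mod/units.py | superize
-- ===== SOURCE A (Python) =====
-- def superize(i:int) -> str:
--     "Turn an integer into unicode superscript."
--     digits = '⁰¹²³⁴⁵⁶⁷⁸⁹'
--     out = []
--     if i == 0:
--         return digits[0]
--     neg = i < 0
--     i = abs(i)
--     while i:
--         out.append(digits[i%10])
--         i //= 10
--     return ('⁻' if neg else '') + ''.join(reversed(out))
-- ===== SOURCE B (Python) =====
-- _SUP = str.maketrans('0123456789-', '⁰¹²³⁴⁵⁶⁷⁸⁹⁻')
--
-- def superize(i: int) -> str: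
--     "Turn an integer into unicode superscript."
--     return str(i).translate(_SUP)
-- ===== Notes on version B (the rewrite author's own statement) =====
-- stated objective: idiomatic
-- what changed: Replaced the modulo/divide digit-extraction loop with its reversal and explicit zero/sign branches by str(i) plus a single character-translation pass via str.maketrans/translate.
import Mathlib
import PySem

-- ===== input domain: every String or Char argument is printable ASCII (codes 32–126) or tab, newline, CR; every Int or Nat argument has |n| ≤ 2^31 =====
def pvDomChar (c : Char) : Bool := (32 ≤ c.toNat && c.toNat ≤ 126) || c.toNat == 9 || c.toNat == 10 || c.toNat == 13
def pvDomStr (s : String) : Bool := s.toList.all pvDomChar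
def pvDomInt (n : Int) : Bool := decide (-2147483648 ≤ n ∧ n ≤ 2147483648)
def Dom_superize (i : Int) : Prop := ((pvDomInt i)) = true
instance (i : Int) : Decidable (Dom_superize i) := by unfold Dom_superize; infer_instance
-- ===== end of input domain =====

-- B replaces A's modulo/divide digit loop, reversal and zero/sign branches by a
-- single character-mapping pass over str(i) (str.maketrans/translate); same cost.

-- ===== PORT A =====
-- digits = '⁰¹²³⁴⁵⁶⁷⁸⁹'
def superizeDigitsA : List Char := ['⁰','¹','²','³','⁴','⁵','⁶','⁷','⁸','⁹']

-- the while loop: out.append(digits[i%10]); i //= 10   (i = abs(i) ≥ 0, so Nat)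
def superizeLoopA (i : Nat) (out : List Char) : List Char :=
  if i = 0 then out
  else superizeLoopA (i / 10) (out ++ [superizeDigitsA.getD (i % 10) '⁰'])
decreasing_by exact Nat.div_lt_self (Nat.pos_of_ne_zero (by assumption)) (by norm_num)

def superize (i : Int) : String :=
  if i = 0 then String.ofList [superizeDigitsA.getD 0 '⁰']
  else
    let neg : Bool := i < 0
    let n : Nat := i.natAbs
    String.ofList ((if neg then ['⁻'] else []) ++ (superizeLoopA n []).reverse)

-- ===== PORT B =====
-- the maketrans table '0123456789-' → '⁰¹²³⁴⁵⁶⁷⁸⁹⁻', identity elsewhere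
def superTrans (c : Char) : Char :=
  match c with
  | '0' => '⁰' | '1' => '¹' | '2' => '²' | '3' => '³' | '4' => '⁴'
  | '5' => '⁵' | '6' => '⁶' | '7' => '⁷' | '8' => '⁸' | '9' => '⁹'
  | '-' => '⁻'
  | c => c

-- str(i).translate(table)
def superize_alt (i : Int) : String :=
  String.ofList ((PySem.Int.toStr i).toList.map superTrans)

-- ===== PRECONDITION & SPEC =====
def Spec_superize (i : Int) (out : String) : Prop := out = superize_alt i
instance (i : Int) (out : String) : Decidable (Spec_superize i out) := by unfold Spec_superize; infer_instance

-- ===== CLAIM (what is proved, stated in full; the proofs are below) =====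
def Claim_equal_superize : Prop := ∀ (i : Int), Dom_superize i → Spec_superize i (superize i)

-- ===== LEMMAS AND PROOFS =====

-- decimal digits of n, least-significant first, as ASCII chars (proof-only helper)
def dLSB (n : Nat) : List Char :=
  Nat.digitChar (n % 10) :: (if h : n / 10 = 0 then [] else dLSB (n / 10))
decreasing_by exact Nat.div_lt_self (Nat.pos_of_ne_zero (fun h0 => h (by simp [h0]))) (by norm_num)

theorem toDigitsCore_eq_dLSB : ∀ (f n : Nat) (acc : List Char), n < f →
    Nat.toDigitsCore 10 f n acc = (dLSB n).reverse ++ acc := by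
  intro f
  induction f with
  | zero => intro n acc h; omega
  | succ f ih =>
    intro n acc h
    rw [Nat.toDigitsCore, dLSB]
    by_cases h10 : n / 10 = 0
    · simp [h10]
    · simp only [h10, if_false]
      rw [ih (n / 10) _ (by omega)]
      simp

theorem superTrans_digitChar (d : Nat) (hd : d < 10) :
    superTrans (Nat.digitChar d) = superizeDigitsA.getD d '⁰' := by
  interval_cases d <;> rfl

theorem superizeLoopA_eq (n : Nat) (out : List Char) (hn : n ≠ 0) :
    superizeLoopA n out = out ++ (dLSB n).map superTrans := by
  induction n using Nat.strong_induction_on generalizing out with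
  | _ n ih =>
    rw [superizeLoopA, dLSB]
    simp only [hn, if_false]
    have hmod : n % 10 < 10 := Nat.mod_lt n (by norm_num)
    by_cases h10 : n / 10 = 0
    · rw [superizeLoopA, dif_pos h10]
      simp [h10, superTrans_digitChar _ hmod, List.getD]
    · rw [dif_neg h10, ih (n / 10) (Nat.div_lt_self (Nat.pos_of_ne_zero hn) (by norm_num)) _ h10]
      simp [superTrans_digitChar _ hmod, List.getD]

theorem main_eq (i : Int) : superize i = superize_alt i := by
  unfold superize superize_alt
  rw [PySem.Int.toList_toStr, PySem.Int.toChars]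
  by_cases h0 : i = 0
  · subst h0
    decide
  · simp only [h0, if_false]
    have habs : i.natAbs ≠ 0 := by omega
    rw [superizeLoopA_eq _ _ habs]
    by_cases hneg : i < 0
    · have : ¬ (0 ≤ i) := by omega
      simp only [hneg, decide_true, if_true, List.nil_append,
        Nat.toDigits, toDigitsCore_eq_dLSB _ _ [] (Nat.lt_succ_self _)]
      simp [List.map_reverse]
      rfl
    · have htn : i.toNat = i.natAbs := by omega
      simp only [hneg, decide_false, if_false, List.nil_append, htn,
        Nat.toDigits, toDigitsCore_eq_dLSB _ _ [] (Nat.lt_succ_self _)]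
      simp [List.map_reverse]

-- ===== VERDICT (by name: the statement is the Claim_ definition above) =====
theorem superize_spec : Claim_equal_superize := by
  intro i _
  unfold Spec_superize
  exact main_eq i
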